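-- pv_equiv track=rewrite | github.com/misha1997/NEOwatchBot | parsers/spaceflightnow.py | _format_launches
-- ===== SOURCE A (Python) =====
-- def _format_launches(launches, max_count=8):
--     """Format launches for Telegram"""
--     message = "🚀 <b>Найближчі запуски ракет</b>\n"
--     message += "<i>(дані з spaceflightnow.com)</i>\n\n"
--
--     current_launch_date = None
--     for launch in launches[:max_count]:
--         if launch['date'] != current_launch_date:
--             current_launch_date = launch['date']
--             message += f"\n📅 <b>{current_launch_date}</b>\n"
--
--         mission = launch['mission'].replace('•', '|')
--         message += f"  🚀 {mission}\n"
--         message += f"     ⏰ {launch['time']}\n"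
--         message += f"     📍 {launch['site']}\n\n"
--
--     return {'text': message, 'image': None}
-- ===== SOURCE B (Python) =====
-- def _format_launches(launches, max_count=8):
--     """Format launches for Telegram"""
--     head = ("🚀 <b>Найближчі запуски ракет</b>\n"
--             "<i>(дані з spaceflightnow.com)</i>\n\n")
--     parts = [head]
--     rest = launches[:max_count]
--     while rest:
--         date = rest[0]['date']
--         j = 1
--         while j < len(rest) and rest[j]['date'] == date:
--             j += 1
--         parts.append(f"\n📅 <b>{date}</b>\n")
--         for launch in rest[:j]:
--             parts.append(f"  🚀 {launch['mission'].replace('•', '|')}\n"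
--                          f"     ⏰ {launch['time']}\n"
--                          f"     📍 {launch['site']}\n\n")
--         rest = rest[j:]
--     return {'text': ''.join(parts), 'image': None}
-- ===== Notes on version B (the rewrite author's own statement) =====
-- stated objective: idiomatic
-- what changed: Replaces the flat pass with a current_launch_date state variable by grouping the selected launches into consecutive same-date runs and rendering each group as a header plus its launches' lines, joined at the end.
import Mathlib
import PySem

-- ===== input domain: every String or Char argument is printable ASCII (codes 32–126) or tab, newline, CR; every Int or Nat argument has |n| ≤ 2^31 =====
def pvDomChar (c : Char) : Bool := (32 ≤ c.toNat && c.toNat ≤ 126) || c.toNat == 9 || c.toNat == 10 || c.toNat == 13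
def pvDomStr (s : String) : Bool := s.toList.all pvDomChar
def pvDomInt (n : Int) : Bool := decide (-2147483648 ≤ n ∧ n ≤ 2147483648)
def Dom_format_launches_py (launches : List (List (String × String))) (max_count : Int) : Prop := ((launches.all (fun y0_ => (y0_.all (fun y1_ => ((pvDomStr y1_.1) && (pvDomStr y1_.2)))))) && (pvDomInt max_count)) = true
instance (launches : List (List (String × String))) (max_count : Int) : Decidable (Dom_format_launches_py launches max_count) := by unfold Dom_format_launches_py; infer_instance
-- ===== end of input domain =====

-- B regroups the flat state-tracking pass into consecutive same-date groups (header once per group,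
-- then the per-launch lines), removing the current_launch_date state variable; objective: idiomatic, same cost.


-- shared literals / dict lookup (dict = assoc list, first match; "" only outside Pre_)
def pvGetS (d : List (String × String)) (k : String) : String := (d.lookup k).getD ""
def pvHead : String := "🚀 <b>Найближчі запуски ракет</b>\n" ++ "<i>(дані з spaceflightnow.com)</i>\n\n"
def pvHdr (date : String) : String := "\n📅 <b>" ++ date ++ "</b>\n"
def pvLines (launch : List (String × String)) : String :=
  "  🚀 " ++ PySem.Str.replace (pvGetS launch "mission") "•" "|" ++ "\n" ++
  "     ⏰ " ++ pvGetS launch "time" ++ "\n" ++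
  "     📍 " ++ pvGetS launch "site" ++ "\n\n"

-- ===== PORT A =====  (flat pass; state = (message, current_launch_date))
def pvStepA (acc : String × Option String) (launch : List (String × String)) : String × Option String :=
  let acc := if acc.2 ≠ some (pvGetS launch "date")
             then (acc.1 ++ pvHdr (pvGetS launch "date"), some (pvGetS launch "date"))
             else acc
  (acc.1 ++ pvLines launch, acc.2)

def format_launches_py (launches : List (List (String × String))) (max_count : Int) : List (String × Option String) :=
  let res := (PySem.List.slice launches none (some max_count)).foldl pvStepA (pvHead, none)
  [("text", some res.1), ("image", none)]

-- ===== PORT B =====  (group consecutive launches by date, then render groups)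
def pvGroups : List (List (String × String)) → List (String × List (List (String × String)))
  | [] => []
  | x :: xs =>
    let d := pvGetS x "date"
    (d, x :: xs.takeWhile (fun y => pvGetS y "date" == d)) ::
      pvGroups (xs.dropWhile (fun y => pvGetS y "date" == d))
termination_by l => l.length
decreasing_by simpa using Nat.lt_succ_of_le (List.length_dropWhile_le _ _)

def pvConcat (parts : List String) : String := parts.foldr (· ++ ·) ""  -- ''.join(parts)

def pvRenderGroup (g : String × List (List (String × String))) : String :=
  pvHdr g.1 ++ pvConcat (g.2.map pvLines)

def format_launches_py_alt (launches : List (List (String × String))) (max_count : Int) : List (String × Option String) :=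
  let msg := pvHead ++ pvConcat ((pvGroups (PySem.List.slice launches none (some max_count))).map pvRenderGroup)
  [("text", some msg), ("image", none)]

-- ===== PRECONDITION & SPEC =====
-- Pre_ excludes exactly the inputs where Python A raises KeyError: a selected launch dict missing
-- one of the keys 'date', 'mission', 'time', 'site'.
def Pre_format_launches_py (launches : List (List (String × String))) (max_count : Int) : Prop :=
  ∀ l ∈ PySem.List.slice launches none (some max_count),
    (l.lookup "date").isSome ∧ (l.lookup "mission").isSome ∧ (l.lookup "time").isSome ∧ (l.lookup "site").isSome
instance (launches : List (List (String × String))) (max_count : Int) : Decidable (Pre_format_launches_py launches max_count) := by unfold Pre_format_launches_py; infer_instance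

def pvWitness_format_launches_py : (List (List (String × String))) × Int :=
  ([[("date", "Oct 1"), ("mission", "M-1"), ("time", "09:00"), ("site", "LC-39A")],
    [("date", "Oct 1"), ("mission", "M-2"), ("time", "10:00"), ("site", "SLC-40")],
    [("date", "Oct 2"), ("mission", "M-3"), ("time", "11:00"), ("site", "Boca")]], 8)

def Spec_format_launches_py (launches : List (List (String × String))) (max_count : Int) (out : List (String × Option String)) : Prop := out = format_launches_py_alt launches max_count
instance (launches : List (List (String × String))) (max_count : Int) (out : List (String × Option String)) : Decidable (Spec_format_launches_py launches max_count out) := by unfold Spec_format_launches_py; infer_instance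

-- ===== CLAIM (what is proved, stated in full; the proofs are below) =====
def Claim_equal_format_launches_py : Prop := ∀ (launches : List (List (String × String))) (max_count : Int), Dom_format_launches_py launches max_count → Pre_format_launches_py launches max_count → Spec_format_launches_py launches max_count (format_launches_py launches max_count)

-- ===== LEMMAS AND PROOFS =====

theorem pv_dropWhile_head_false {α : Type} (p : α → Bool) (l : List α) (x : α) (xs : List α)
    (h : l.dropWhile p = x :: xs) : p x = false := by
  induction l with
  | nil => simp at h
  | cons a as ih =>
    by_cases hp : p a
    · rw [List.dropWhile_cons_of_pos hp] at h; exact ih h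
    · rw [List.dropWhile_cons_of_neg hp] at h; cases h; simpa using hp

-- folding A's step over a block of launches that all carry the current date appends just their lines
theorem pv_foldl_sameDate (g : List (List (String × String))) (d : String)
    (h : ∀ y ∈ g, pvGetS y "date" = d) (msg : String) :
    g.foldl pvStepA (msg, some d) = (msg ++ pvConcat (g.map pvLines), some d) := by
  induction g generalizing msg with
  | nil => simp [pvConcat]
  | cons y g ih =>
    have hy : pvGetS y "date" = d := h y (by simp)
    have hstep : pvStepA (msg, some d) y = (msg ++ pvLines y, some d) := by
      simp [pvStepA, hy]
    rw [List.foldl_cons, hstep, ih (fun z hz => h z (by simp [hz]))]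
    simp [pvConcat, String.append_assoc]

-- A's fold from any state whose remembered date differs from the first launch's date
-- produces exactly B's grouped rendering appended to the accumulated message
theorem pv_foldl_groups (l : List (List (String × String))) :
    ∀ (msg : String) (cd : Option String),
      (∀ x xs, l = x :: xs → cd ≠ some (pvGetS x "date")) →
      (l.foldl pvStepA (msg, cd)).1 = msg ++ pvConcat ((pvGroups l).map pvRenderGroup) := by
  induction l using pvGroups.induct with
  | case1 => intro msg cd _; simp [pvGroups, pvConcat]
  | case2 x xs d ih =>
    intro msg cd hcd
    have hne : cd ≠ some (pvGetS x "date") := hcd x xs rfl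
    have hstep : pvStepA (msg, cd) x = ((msg ++ pvHdr d) ++ pvLines x, some d) := by
      simp [pvStepA, hne, d]
    have hsplit : xs = xs.takeWhile (fun y => pvGetS y "date" == d) ++
        xs.dropWhile (fun y => pvGetS y "date" == d) :=
      (List.takeWhile_append_dropWhile).symm
    rw [List.foldl_cons, hstep, hsplit, List.foldl_append]
    rw [pv_foldl_sameDate _ d (fun y hy => by
          have := List.mem_takeWhile_imp hy
          simpa using this)]
    rw [ih _ (some d) (fun z zs hz => by
          have hpz := pv_dropWhile_head_false (fun y => pvGetS y "date" == d) xs z zs hz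
          simp only [beq_eq_false_iff_ne, ne_eq] at hpz
          simpa using fun hdz => hpz hdz.symm)]
    rw [pvGroups]
    simp [pvRenderGroup, pvConcat, String.append_assoc, d]

-- ===== VERDICT (by name: the statement is the Claim_ definition above) =====
theorem format_launches_py_spec : Claim_equal_format_launches_py := by
  unfold Claim_equal_format_launches_py
  intro launches max_count _ _
  unfold Spec_format_launches_py
  simp only [format_launches_py, format_launches_py_alt]
  rw [pv_foldl_groups _ pvHead none (fun _ _ _ => by simp)]
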